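-- pv_equiv track=rewrite | github.com/coseeing/WordBridge | addon/globalPlugins/WordBridge/lib/utils.py | text_segmentation
-- ===== SOURCE A (Python) =====
-- SEPERATOR = "﹐，,.。﹒．｡!ǃⵑ︕！;;︔﹔；?︖﹖？⋯ "
--
-- def text_segmentation(text: str, max_length: int = 30) -> tuple:
-- 	"""
-- 	This function can be used to split a string into substrings based on a set of specified separators or
-- 	a maximum length limit.
--
-- 	Parameters:
-- 		text (str): A string that needs to be partitioned into substrings based on certain separators or
-- 					a maximum length limit.
-- 		max_length (int): The maximum length of each substring. If a substring reaches this length, it will be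
-- 							partitioned at the next separator encountered.
-- 	Returns:
-- 		A list of substrings.
-- 	"""
--
-- 	partitions = []
--
-- 	word = ""
-- 	for char in text:
-- 		word += char
--
-- 		if char in SEPERATOR and len(word) >= max_length:
-- 			partitions.append(word)
-- 			word = ""
--
-- 	if not word:
-- 		return partitions
--
-- 	if not partitions or len(word) > max_length / 2:
-- 		partitions.append(word)
-- 	else:
-- 		partitions[-1] += word
--
-- 	return partitions
-- ===== SOURCE B (Python) =====
-- SEPERATOR = "﹐，,.。﹒．｡!ǃⵑ︕！;;︔﹔；?︖﹖？⋯ "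
--
-- def text_segmentation(text: str, max_length: int = 30) -> tuple:
-- 	# Two-phase: tokenize into separator-terminated segments, then group them.
-- 	segments = []
-- 	buf = []
-- 	for char in text:
-- 		buf.append(char)
-- 		if char in SEPERATOR:
-- 			segments.append("".join(buf))
-- 			buf = []
-- 	tail = "".join(buf)
--
-- 	partitions = []
-- 	current = ""
-- 	for seg in segments:
-- 		current += seg
-- 		if len(current) >= max_length:
-- 			partitions.append(current)
-- 			current = ""
-- 	current += tail
--
-- 	if not current:
-- 		return partitions
-- 	if not partitions or len(current) > max_length / 2:
-- 		partitions.append(current)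
-- 	else:
-- 		partitions[-1] += current
-- 	return partitions
-- ===== Notes on version B (the rewrite author's own statement) =====
-- stated objective: alternative
-- what changed: Replaced the single per-character scan with a two-phase pass: first tokenize the text into separator-terminated segments, then group whole segments into partitions by the length threshold.
import Mathlib
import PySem

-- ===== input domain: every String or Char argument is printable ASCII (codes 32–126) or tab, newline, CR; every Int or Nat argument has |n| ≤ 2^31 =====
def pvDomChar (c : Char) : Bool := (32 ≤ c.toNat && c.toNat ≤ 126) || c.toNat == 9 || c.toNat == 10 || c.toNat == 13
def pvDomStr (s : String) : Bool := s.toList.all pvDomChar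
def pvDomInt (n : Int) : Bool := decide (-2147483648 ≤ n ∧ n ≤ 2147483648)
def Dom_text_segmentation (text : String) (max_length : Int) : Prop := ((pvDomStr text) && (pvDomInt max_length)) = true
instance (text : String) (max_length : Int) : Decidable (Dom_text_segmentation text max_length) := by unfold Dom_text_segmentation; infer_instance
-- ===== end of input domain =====

-- B replaces A's per-character scan by a two-phase tokenize-then-group pass (alternative decomposition, same cost).


-- the module constant SEPERATOR, as a list of chars (membership `char in SEPERATOR`)
def pvSep : List Char := "﹐，,.。﹒．｡!ǃⵑ︕！;;︔﹔；?︖﹖？⋯ ".toList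

-- ===== PORT A =====
-- per-character loop state: (partitions, word); word kept as List Char (len = list length)
def aStep (max_length : Int) (s : List String × List Char) (c : Char) : List String × List Char :=
  let w := s.2 ++ [c]
  if pvSep.contains c ∧ max_length ≤ (w.length : Int) then (s.1 ++ [String.mk w], ([] : List Char))
  else (s.1, w)

-- `len(word) > max_length / 2` (float) is exact as `2*len(word) > max_length` for these integer sizes
def text_segmentation (text : String) (max_length : Int) : List String :=
  let r := text.toList.foldl (aStep max_length) ([], [])
  if r.2 = [] then r.1
  else if r.1 = [] ∨ max_length < 2 * (r.2.length : Int) then r.1 ++ [String.mk r.2]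
  else r.1.dropLast ++ [r.1.getLast! ++ String.mk r.2]

-- ===== PORT B =====
-- phase 1: tokenize into separator-terminated segments plus trailing buffer
def tokStep (s : List (List Char) × List Char) (c : Char) : List (List Char) × List Char :=
  let b := s.2 ++ [c]
  if pvSep.contains c then (s.1 ++ [b], ([] : List Char)) else (s.1, b)

-- phase 2: group whole segments; state (partitions, current)
def bStep (max_length : Int) (s : List String × List Char) (seg : List Char) : List String × List Char :=
  let cur := s.2 ++ seg
  if max_length ≤ (cur.length : Int) then (s.1 ++ [String.mk cur], ([] : List Char)) else (s.1, cur)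

def text_segmentation_alt (text : String) (max_length : Int) : List String :=
  let t := text.toList.foldl tokStep ([], [])
  let r := t.1.foldl (bStep max_length) ([], [])
  let cur := r.2 ++ t.2
  if cur = [] then r.1
  else if r.1 = [] ∨ max_length < 2 * (cur.length : Int) then r.1 ++ [String.mk cur]
  else r.1.dropLast ++ [r.1.getLast! ++ String.mk cur]

-- ===== PRECONDITION & SPEC =====
def Spec_text_segmentation (text : String) (max_length : Int) (out : List String) : Prop := out = text_segmentation_alt text max_length
instance (text : String) (max_length : Int) (out : List String) : Decidable (Spec_text_segmentation text max_length out) := by unfold Spec_text_segmentation; infer_instance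

-- ===== CLAIM (what is proved, stated in full; the proofs are below) =====
def Claim_equal_text_segmentation : Prop := ∀ (text : String) (max_length : Int), Dom_text_segmentation text max_length → Spec_text_segmentation text max_length (text_segmentation text max_length)

-- ===== LEMMAS AND PROOFS =====

-- tokenizer: a segment prefix of the state just passes through
lemma tok_prefix (cs : List Char) : ∀ (s : List (List Char)) (b : List Char),
    cs.foldl tokStep (s, b) = (s ++ (cs.foldl tokStep ([], b)).1, (cs.foldl tokStep ([], b)).2) := by
  induction cs with
  | nil => intro s b; simp
  | cons c cs ih =>
    intro s b
    simp only [List.foldl_cons, tokStep]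
    by_cases h : pvSep.contains c = true
    · simp only [h, if_true, List.nil_append]
      rw [ih (s ++ [b ++ [c]]) [], ih [b ++ [c]] []]
      simp [List.append_assoc]
    · simp only [h]
      exact ih s (b ++ [c])

-- main invariant: A's scan from word = cur ++ b equals B's grouping of the tokenization from buffer b
lemma main_inv (ml : Int) (cs : List Char) : ∀ (P : List String) (cur b : List Char),
    cs.foldl (aStep ml) (P, cur ++ b) =
      (((cs.foldl tokStep ([], b)).1.foldl (bStep ml) (P, cur)).1,
       ((cs.foldl tokStep ([], b)).1.foldl (bStep ml) (P, cur)).2 ++ (cs.foldl tokStep ([], b)).2) := by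
  induction cs with
  | nil => intro P cur b; simp
  | cons c cs ih =>
    intro P cur b
    simp only [List.foldl_cons, tokStep, aStep]
    by_cases hc : pvSep.contains c = true
    · simp only [hc, true_and, if_true, List.nil_append]
      rw [tok_prefix cs [b ++ [c]] []]
      simp only [List.singleton_append, List.foldl_cons, bStep]
      rw [show cur ++ (b ++ [c]) = cur ++ b ++ [c] from (List.append_assoc cur b [c]).symm]
      by_cases hm : ml ≤ ((cur ++ b ++ [c]).length : Int)
      · simp only [hm, if_true]
        have := ih (P ++ [String.mk (cur ++ b ++ [c])]) [] []
        simpa using this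
      · simp only [hm, if_false]
        have := ih P (cur ++ b ++ [c]) []
        simpa using this
    · simp only [hc]
      have := ih P cur (b ++ [c])
      rw [← List.append_assoc] at this
      exact this

-- ===== VERDICT (by name: the statement is the Claim_ definition above) =====
theorem text_segmentation_spec : Claim_equal_text_segmentation := by
  intro text ml _
  show text_segmentation text ml = text_segmentation_alt text ml
  unfold text_segmentation text_segmentation_alt
  have h := main_inv ml text.toList [] [] []
  simp only [List.append_nil] at h
  rw [h]
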